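-- pv_equiv track=rewrite | github.com/rbgksqkr/TIL | 프로그래머스/unrated/176962. 과제 진행하기/과제 진행하기.py | solution
-- ===== SOURCE A (Python) =====
-- def solution(plans):
--     answer = []
--     rest_assignment = []
--     plans.sort(key=lambda x:x[1])
--     plans_length = len(plans)
--     for i in range(1, plans_length):
--         prev_hour, prev_minute = map(int, plans[i-1][1].split(':'))
--         last_hour, last_minute = map(int, plans[i][1].split(':'))
--         diff_hour = last_hour - prev_hour
--         diff_minute = last_minute - prev_minute
--
--         if diff_hour > 0: diff_minute += diff_hour * 60
--         rest_time = int(plans[i-1][2]) - diff_minute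
--
--         # 과제가 끝나기 전에 새로운 과제를 시작할 시각이 되었을 때
--         if rest_time > 0:
--             rest_assignment.append([plans[i-1][0],rest_time])
--
--         # 새로운 과제 시작 전 과제가 끝남
--         if rest_time <= 0:
--             answer.append(plans[i-1][0])
--             # 다음 과제 시작 전 시간이 남을 때
--             while len(rest_assignment) > 0:
--                 rest_assignment[-1][1] -= abs(rest_time)
--                 if rest_assignment[-1][1] <= 0:
--                     rest_time = abs(rest_assignment[-1][1])
--                     answer.append(rest_assignment.pop()[0])
--                 else:
--                     break
--
--     answer.append(plans[-1][0])
--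
--     # plans 끝나고 최근 목록부터 처리
--     while len(rest_assignment) > 0:
--         answer.append(rest_assignment.pop()[0])
--     return answer
-- ===== SOURCE B (Python) =====
-- def solution(plans):
--     plans.sort(key=lambda x: x[1])
--     if len(plans) == 1:
--         return [plans[0][0]]
--     tasks = []
--     for p in plans:
--         h, m = p[1].split(':')
--         tasks.append((p[0], int(h) * 60 + int(m), int(p[2])))
--     n = len(tasks)
--     finish = []
--     for i in range(n):
--         name, start, dur = tasks[i]
--         t = start + dur
--         for j in range(i + 1, n):
--             if tasks[j][1] < t:
--                 t += tasks[j][2]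
--             else:
--                 break
--         finish.append((t, name))
--     finish.sort(key=lambda x: x[0])
--     return [name for _, name in finish]
-- ===== Notes on version B (the rewrite author's own statement) =====
-- stated objective: alternative
-- what changed: Replaces A's online paused-task stack simulation (per-event push/pop with leftover-slack bookkeeping) by computing each task's absolute finish time via forward gap absorption and then sorting the tasks by finish time.
-- outside the precondition, e.g. on solution([['a', '10:50', '3'], ['b', '9:55', '10']]): A returns ['a', 'b'], B returns ['b', 'a']; on solution([['a', '09:00', '3'], ['b', '09:05', '-10']]): A returns ['a', 'b'], B returns ['b', 'a']; on solution([['a', '1:0', '2'], ['b', '1:1', 'x']]): A returns ['b', 'a'], B raises ValueError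
import Mathlib
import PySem

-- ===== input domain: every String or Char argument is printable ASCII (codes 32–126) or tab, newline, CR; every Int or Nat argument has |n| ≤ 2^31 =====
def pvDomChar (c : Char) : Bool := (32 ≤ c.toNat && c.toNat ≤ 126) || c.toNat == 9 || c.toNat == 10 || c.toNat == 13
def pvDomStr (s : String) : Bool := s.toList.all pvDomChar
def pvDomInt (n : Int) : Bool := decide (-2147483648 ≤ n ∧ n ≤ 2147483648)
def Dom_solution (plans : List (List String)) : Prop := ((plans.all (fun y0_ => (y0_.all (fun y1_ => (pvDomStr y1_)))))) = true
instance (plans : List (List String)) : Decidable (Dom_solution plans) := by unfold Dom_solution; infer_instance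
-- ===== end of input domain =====

-- B replaces A's paused-task stack simulation by per-task finish times (gap absorption) + a sort
-- by finish time; both A and B sort `plans` in place by start-time string (same observable mutation);
-- the equivalence proved here is about the return value.

-- ===== PORT A =====
-- prev_hour, prev_minute = map(int, s.split(':'))  (outside Pre_ Python raises; the (0,0)/0 defaults are never reached under Pre_)
def pyParseTwo (s : String) : Int × Int :=
  match PySem.Str.split? s ":" with
  | some [a, b] => ((PySem.Int.ofStr? a).getD 0, (PySem.Int.ofStr? b).getD 0)
  | _ => (0, 0)

-- the inner `while len(rest_assignment) > 0` loop of A; the Python list's LAST element is the head here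
def drainA (rt : Int) (st : List (String × Int)) (ans : List String) : List String × List (String × Int) :=
  match st with
  | [] => (ans, [])
  | (nm, r) :: tl =>
    let r' := r - |rt|
    if r' ≤ 0 then drainA r' tl (ans ++ [nm]) else (ans, (nm, r') :: tl)

def solution (plans : List (List String)) : List String :=
  let ps := PySem.List.sorted plans (fun x => PySem.List.pyGetD x 1 "") false
  let n := PySem.List.len ps
  let step := fun (s : List String × List (String × Int)) (i : Int) =>
    let prev := PySem.List.pyGetD ps (i - 1) []
    let cur := PySem.List.pyGetD ps i []
    let ph := (pyParseTwo (PySem.List.pyGetD prev 1 "")).1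
    let pm := (pyParseTwo (PySem.List.pyGetD prev 1 "")).2
    let lh := (pyParseTwo (PySem.List.pyGetD cur 1 "")).1
    let lm := (pyParseTwo (PySem.List.pyGetD cur 1 "")).2
    let dh := lh - ph
    let dm0 := lm - pm
    let dm := if dh > 0 then dm0 + dh * 60 else dm0
    let restTime := (PySem.Int.ofStr? (PySem.List.pyGetD prev 2 "")).getD 0 - dm
    if restTime > 0 then (s.1, (PySem.List.pyGetD prev 0 "", restTime) :: s.2)
    else drainA restTime s.2 (s.1 ++ [PySem.List.pyGetD prev 0 ""])
  let r := (PySem.List.pyRange 1 n 1).foldl step ([], [])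
  (r.1 ++ [PySem.List.pyGetD (PySem.List.pyGetD ps (-1) []) 0 ""]) ++ r.2.map Prod.fst

-- ===== PORT B =====
-- (p[0], int(h)*60 + int(m), int(p[2]))
def parseTaskB (p : List String) : String × Int × Int :=
  match PySem.Str.split? (PySem.List.pyGetD p 1 "") ":" with
  | some [h, m] =>
    (PySem.List.pyGetD p 0 "",
     ((PySem.Int.ofStr? h).getD 0) * 60 + (PySem.Int.ofStr? m).getD 0,
     (PySem.Int.ofStr? (PySem.List.pyGetD p 2 "")).getD 0)
  | _ => (PySem.List.pyGetD p 0 "", 0, 0)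

-- the inner `for j in range(i+1, n): … else: break` loop, as recursion on the suffix after i
def absorb (t : Int) : List (String × Int × Int) → Int
  | [] => t
  | (_, s, d) :: tl => if s < t then absorb (t + d) tl else t

-- the outer `for i in range(n)` loop building `finish`, as recursion on suffixes
def finishList : List (String × Int × Int) → List (Int × String)
  | [] => []
  | (nm, s, d) :: tl => (absorb (s + d) tl, nm) :: finishList tl

def solution_alt (plans : List (List String)) : List String :=
  let ps := PySem.List.sorted plans (fun x => PySem.List.pyGetD x 1 "") false
  if PySem.List.len ps = 1 then [PySem.List.pyGetD (PySem.List.pyGetD ps 0 []) 0 ""]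
  else
    let tasks := ps.map parseTaskB
    let finish := finishList tasks
    (PySem.List.sorted finish (fun x => x.1) false).map Prod.snd

-- ===== PRECONDITION & SPEC =====
-- Pre_ admits every single-plan input A accepts (A parses nothing there) and otherwise the puzzle's
-- canonical format: plans [name, "HH:MM", duration, …] with a zero-padded two-digit hour, minutes
-- 00-59, and a duration int(·) parses to a value ≥ 1.  It excludes (a) inputs where A raises
-- (missing fields, unsplittable/unparsable strings), and (b) malformed times / nonpositive durations,
-- where A still returns but the completion order falls out of its lexicographic string sort,
-- hour-guarded time difference and never-read fields — corners no statement covers.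
def timeOK (s : String) : Bool :=
  match s.toList with
  | [h1, h2, c, m1, m2] =>
    ('0' ≤ h1 && h1 ≤ '9') && ('0' ≤ h2 && h2 ≤ '9') && (c = ':') &&
    ('0' ≤ m1 && m1 ≤ '5') && ('0' ≤ m2 && m2 ≤ '9')
  | _ => false

def planOK (p : List String) : Bool :=
  match p with
  | _ :: time :: dur :: _ => timeOK time && decide (1 ≤ (PySem.Int.ofStr? dur).getD 0)
  | _ => false

def Pre_solution (plans : List (List String)) : Prop :=
  (plans.length = 1 ∧ 2 ≤ (plans.headD []).length) ∨
    (plans ≠ [] ∧ ∀ p ∈ plans, planOK p = true)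

instance (plans : List (List String)) : Decidable (Pre_solution plans) := by
  unfold Pre_solution; infer_instance

def pvWitness_solution : List (List String) :=
  [["a", "09:00", "10"], ["b", "09:05", "2"]]

def Spec_solution (plans : List (List String)) (out : List String) : Prop := out = solution_alt plans
instance (plans : List (List String)) (out : List String) : Decidable (Spec_solution plans out) := by unfold Spec_solution; infer_instance

-- ===== CLAIM (what is proved, stated in full; the proofs are below) =====
def Claim_equal_solution : Prop := ∀ (plans : List (List String)), Dom_solution plans → Pre_solution plans → Spec_solution plans (solution plans)

-- ===== LEMMAS AND PROOFS =====

-- ---- characters and parsing groundwork ----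

theorem digit_cases (c : Char) (h1 : '0' ≤ c) (h2 : c ≤ '9') :
    c = '0' ∨ c = '1' ∨ c = '2' ∨ c = '3' ∨ c = '4' ∨ c = '5' ∨ c = '6' ∨ c = '7' ∨ c = '8' ∨ c = '9' := by
  have l1 : (48 : Nat) ≤ c.toNat := h1
  have l2 : c.toNat ≤ 57 := h2
  have key : ∀ d : Char, c.toNat = d.toNat → c = d := by
    intro d h
    have := congrArg Char.ofNat h
    simpa [Char.ofNat_toNat] using this
  interval_cases h : c.toNat
  · exact Or.inl (key '0' (by decide))
  · exact Or.inr <| Or.inl (key '1' (by decide))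
  · exact Or.inr <| Or.inr <| Or.inl (key '2' (by decide))
  · exact Or.inr <| Or.inr <| Or.inr <| Or.inl (key '3' (by decide))
  · exact Or.inr <| Or.inr <| Or.inr <| Or.inr <| Or.inl (key '4' (by decide))
  · exact Or.inr <| Or.inr <| Or.inr <| Or.inr <| Or.inr <| Or.inl (key '5' (by decide))
  · exact Or.inr <| Or.inr <| Or.inr <| Or.inr <| Or.inr <| Or.inr <| Or.inl (key '6' (by decide))
  · exact Or.inr <| Or.inr <| Or.inr <| Or.inr <| Or.inr <| Or.inr <| Or.inr <| Or.inl (key '7' (by decide))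
  · exact Or.inr <| Or.inr <| Or.inr <| Or.inr <| Or.inr <| Or.inr <| Or.inr <| Or.inr <| Or.inl (key '8' (by decide))
  · exact Or.inr <| Or.inr <| Or.inr <| Or.inr <| Or.inr <| Or.inr <| Or.inr <| Or.inr <| Or.inr (key '9' (by decide))

theorem ofChars_pair (a b : Char) (ha1 : '0' ≤ a) (ha2 : a ≤ '9') (hb1 : '0' ≤ b) (hb2 : b ≤ '9') :
    PySem.Int.ofChars? [a, b] = some (10 * (a.toNat : Int) + (b.toNat : Int) - 528) := by
  rcases digit_cases a ha1 ha2 with rfl|rfl|rfl|rfl|rfl|rfl|rfl|rfl|rfl|rfl <;>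
    rcases digit_cases b hb1 hb2 with rfl|rfl|rfl|rfl|rfl|rfl|rfl|rfl|rfl|rfl <;> decide

theorem splitOn_time (a b c d : Char) (ha : ':' ≠ a) (hb : ':' ≠ b) (hc : ':' ≠ c) (hd : ':' ≠ d) :
    PySem.Chars.splitOn [a, b, ':', c, d] [':'] = [[a, b], [c, d]] := by
  simp [PySem.Chars.splitOn, PySem.Chars.splitOn.go, ha, hb, hc, hd]

-- hour / minute value of a canonical "HH:MM" string
def hvOf (s : String) : Int :=
  match s.toList with
  | [a, b, _, _, _] => 10 * (a.toNat : Int) + (b.toNat : Int) - 528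
  | _ => 0

def mvOf (s : String) : Int :=
  match s.toList with
  | [_, _, _, c, d] => 10 * (c.toNat : Int) + (d.toNat : Int) - 528
  | _ => 0

theorem ne_colon (c : Char) (h : c ≤ '9') : ':' ≠ c := by
  intro he
  have h1 : (58 : Nat) = c.toNat := congrArg Char.toNat he
  have h2 : c.toNat ≤ 57 := h
  omega

theorem timeOK_facts (s : String) (h : timeOK s = true) :
    pyParseTwo s = (hvOf s, mvOf s) ∧
    (∀ p : List String, ∀ nm dur tl, p = nm :: s :: dur :: tl →
      parseTaskB p = (nm, hvOf s * 60 + mvOf s, (PySem.Int.ofStr? dur).getD 0)) ∧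
    0 ≤ hvOf s ∧ hvOf s ≤ 99 ∧ 0 ≤ mvOf s ∧ mvOf s ≤ 59 := by
  unfold timeOK at h
  split at h
  case h_2 => simp at h
  case h_1 h1 h2 c m1 m2 heq =>
    simp only [Bool.and_eq_true, decide_eq_true_eq] at h
    obtain ⟨⟨⟨⟨⟨ha1, ha2⟩, hb1, hb2⟩, hc⟩, hm11, hm12⟩, hm21, hm22⟩ := h
    subst hc
    have na := ne_colon h1 ha2
    have nb := ne_colon h2 hb2
    have nc := ne_colon m1 (le_trans hm12 (by decide))
    have nd := ne_colon m2 hm22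
    have hsplit : PySem.Str.split? s ":" = some [String.ofList [h1, h2], String.ofList [m1, m2]] := by
      simp only [PySem.Str.split?, PySem.Chars.split?]
      rw [show (":" : String).toList = [':'] from rfl, heq]
      rw [splitOn_time h1 h2 m1 m2 na nb nc nd]
      rfl
    have hofh : PySem.Int.ofStr? (String.ofList [h1, h2]) =
        some (10 * (h1.toNat : Int) + (h2.toNat : Int) - 528) := by
      rw [PySem.Int.ofStr?_ofList]; exact ofChars_pair h1 h2 ha1 ha2 hb1 hb2
    have hofm : PySem.Int.ofStr? (String.ofList [m1, m2]) =
        some (10 * (m1.toNat : Int) + (m2.toNat : Int) - 528) := by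
      rw [PySem.Int.ofStr?_ofList]
      exact ofChars_pair m1 m2 hm11 (le_trans hm12 (by decide)) hm21 hm22
    have hv : hvOf s = 10 * (h1.toNat : Int) + (h2.toNat : Int) - 528 := by
      simp [hvOf, heq]
    have mv : mvOf s = 10 * (m1.toNat : Int) + (m2.toNat : Int) - 528 := by
      simp [mvOf, heq]
    have b1 : (48 : Nat) ≤ h1.toNat := ha1
    have b2 : h1.toNat ≤ 57 := ha2
    have b3 : (48 : Nat) ≤ h2.toNat := hb1
    have b4 : h2.toNat ≤ 57 := hb2
    have b5 : (48 : Nat) ≤ m1.toNat := hm11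
    have b6 : m1.toNat ≤ 53 := hm12
    have b7 : (48 : Nat) ≤ m2.toNat := hm21
    have b8 : m2.toNat ≤ 57 := hm22
    refine ⟨?_, ?_, ?_, ?_, ?_, ?_⟩
    · unfold pyParseTwo
      rw [hsplit]
      simp [hofh, hofm, hv, mv]
    · intro p nm dur tl hp
      subst hp
      unfold parseTaskB
      have hidx1 : PySem.List.pyGetD (nm :: s :: dur :: tl) (1 : Int) "" = s := by
        simp [pysem]
      have hidx0 : PySem.List.pyGetD (nm :: s :: dur :: tl) (0 : Int) "" = nm := by
        simp [pysem]
      have hidx2 : PySem.List.pyGetD (nm :: s :: dur :: tl) (2 : Int) "" = dur := by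
        simp [pysem]
      rw [hidx1, hidx0, hidx2, hsplit]
      simp [hofh, hofm, hv, mv]
    · omega
    · omega
    · omega
    · omega

theorem timeOK_le (s t : String) (hs : timeOK s = true) (ht : timeOK t = true) (hle : s ≤ t) :
    hvOf s ≤ hvOf t ∧ hvOf s * 60 + mvOf s ≤ hvOf t * 60 + mvOf t := by
  unfold timeOK at hs ht
  split at hs
  case h_2 => simp at hs
  case h_1 a1 a2 c1 u1 u2 heqs =>
  split at ht
  case h_2 => simp at ht
  case h_1 b1 b2 c2 v1 v2 heqt =>
  simp only [Bool.and_eq_true, decide_eq_true_eq] at hs ht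
  obtain ⟨⟨⟨⟨⟨sa1, sa2⟩, sb1, sb2⟩, sc⟩, sm11, sm12⟩, sm21, sm22⟩ := hs
  obtain ⟨⟨⟨⟨⟨ta1, ta2⟩, tb1, tb2⟩, tc⟩, tm11, tm12⟩, tm21, tm22⟩ := ht
  subst sc; subst tc
  have hvs : hvOf s = 10 * (a1.toNat : Int) + (a2.toNat : Int) - 528 := by simp [hvOf, heqs]
  have mvs : mvOf s = 10 * (u1.toNat : Int) + (u2.toNat : Int) - 528 := by simp [mvOf, heqs]
  have hvt : hvOf t = 10 * (b1.toNat : Int) + (b2.toNat : Int) - 528 := by simp [hvOf, heqt]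
  have mvt : mvOf t = 10 * (v1.toNat : Int) + (v2.toNat : Int) - 528 := by simp [mvOf, heqt]
  have c1 : (48 : Nat) ≤ a1.toNat := sa1
  have c2 : a1.toNat ≤ 57 := sa2
  have c3 : (48 : Nat) ≤ a2.toNat := sb1
  have c4 : a2.toNat ≤ 57 := sb2
  have c5 : (48 : Nat) ≤ u1.toNat := sm11
  have c6 : u1.toNat ≤ 53 := sm12
  have c7 : (48 : Nat) ≤ u2.toNat := sm21
  have c8 : u2.toNat ≤ 57 := sm22
  have d1 : (48 : Nat) ≤ b1.toNat := ta1
  have d2 : b1.toNat ≤ 57 := ta2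
  have d3 : (48 : Nat) ≤ b2.toNat := tb1
  have d4 : b2.toNat ≤ 57 := tb2
  have d5 : (48 : Nat) ≤ v1.toNat := tm11
  have d6 : v1.toNat ≤ 53 := tm12
  have d7 : (48 : Nat) ≤ v2.toNat := tm21
  have d8 : v2.toNat ≤ 57 := tm22
  rw [hvs, mvs, hvt, mvt]
  have hl : s.toList ≤ t.toList := String.le_iff_toList_le.mp hle
  rw [heqs, heqt] at hl
  rcases le_iff_lt_or_eq.mp hl with hlt | heq
  · rcases List.cons_lt_cons_iff.mp hlt with hx | ⟨he1, hlt⟩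
    · have : a1.toNat < b1.toNat := hx
      omega
    · have e1 : a1.toNat = b1.toNat := congrArg Char.toNat he1
      rcases List.cons_lt_cons_iff.mp hlt with hx | ⟨he2, hlt⟩
      · have : a2.toNat < b2.toNat := hx
        omega
      · have e2 : a2.toNat = b2.toNat := congrArg Char.toNat he2
        rcases List.cons_lt_cons_iff.mp hlt with hx | ⟨_, hlt⟩
        · have : (58 : Nat) < 58 := hx
          omega
        · rcases List.cons_lt_cons_iff.mp hlt with hx | ⟨he3, hlt⟩
          · have : u1.toNat < v1.toNat := hx
            omega
          · have e3 : u1.toNat = v1.toNat := congrArg Char.toNat he3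
            rcases List.cons_lt_cons_iff.mp hlt with hx | ⟨he4, hlt⟩
            · have : u2.toNat < v2.toNat := hx
              omega
            · exact absurd hlt (lt_irrefl _)
  · simp only [List.cons.injEq] at heq
    obtain ⟨e1, e2, _, e3, e4, _⟩ := heq
    have f1 : a1.toNat = b1.toNat := congrArg Char.toNat e1
    have f2 : a2.toNat = b2.toNat := congrArg Char.toNat e2
    have f3 : u1.toNat = v1.toNat := congrArg Char.toNat e3
    have f4 : u2.toNat = v2.toNat := congrArg Char.toNat e4
    omega

theorem planOK_shape (p : List String) (h : planOK p = true) :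
    ∃ nm time dur tl, p = nm :: time :: dur :: tl ∧ timeOK time = true ∧
      1 ≤ (PySem.Int.ofStr? dur).getD 0 := by
  match p, h with
  | nm :: time :: dur :: tl, h =>
    have h' : timeOK time = true ∧ 1 ≤ (PySem.Int.ofStr? dur).getD 0 := by
      simpa [planOK] using h
    exact ⟨nm, time, dur, tl, rfl, h'.1, h'.2⟩

theorem parseTaskB_name (p : List String) : (parseTaskB p).1 = PySem.List.pyGetD p 0 "" := by
  unfold parseTaskB; split <;> rfl

-- ---- the reference machine (A's loop on parsed tasks) and the finish-time keys ----

def stepP (s : List String × List (String × Int)) (a b : String × Int × Int) :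
    List String × List (String × Int) :=
  let rt := a.2.2 - (b.2.1 - a.2.1)
  if rt > 0 then (s.1, (a.1, rt) :: s.2) else drainA rt s.2 (s.1 ++ [a.1])

def stepPz (s : List String × List (String × Int))
    (pr : (String × Int × Int) × (String × Int × Int)) : List String × List (String × Int) :=
  stepP s pr.1 pr.2

def runR : String × Int × Int → List (String × Int) → List (String × Int × Int) → List String
  | cur, st, [] => cur.1 :: st.map Prod.fst
  | cur, st, b :: rest =>
    let rt := cur.2.2 - (b.2.1 - cur.2.1)
    if rt > 0 then runR b ((cur.1, rt) :: st) rest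
    else
      let d := drainA rt st [cur.1]
      d.1 ++ runR b d.2 rest

def stKeys : Int → List (String × Int) → List (String × Int × Int) → List (Int × String)
  | _, [], _ => []
  | x, (nm, r) :: tl, rest => (absorb (x + r) rest, nm) :: stKeys (x + r) tl rest

def allPairs (cur : String × Int × Int) (st : List (String × Int))
    (rest : List (String × Int × Int)) : List (Int × String) :=
  (absorb (cur.2.1 + cur.2.2) rest, cur.1) ::
    (stKeys (cur.2.1 + cur.2.2) st rest ++ finishList rest)

-- ---- absorb / stKeys / finishList facts ----

theorem absorb_ge (l : List (String × Int × Int)) (hd : ∀ y ∈ l, 0 ≤ y.2.2) (x : Int) :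
    x ≤ absorb x l := by
  induction l generalizing x with
  | nil => simp [absorb]
  | cons b tl ih =>
    obtain ⟨nm, s, dd⟩ := b
    have hd0 : (0 : Int) ≤ dd := hd (nm, s, dd) (by simp)
    have htl : ∀ y ∈ tl, 0 ≤ y.2.2 := fun y hy => hd y (by simp [hy])
    by_cases h : s < x
    · simpa [absorb, h] using le_trans (by omega) (ih htl (x + dd))
    · simp [absorb, h]

theorem absorb_mono (l : List (String × Int × Int)) (hd : ∀ y ∈ l, 0 ≤ y.2.2)
    (x y : Int) (hxy : x < y) : absorb x l < absorb y l := by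
  induction l generalizing x y with
  | nil => simpa [absorb]
  | cons b tl ih =>
    obtain ⟨nm, s, dd⟩ := b
    have hd0 : (0 : Int) ≤ dd := hd (nm, s, dd) (by simp)
    have htl : ∀ y ∈ tl, 0 ≤ y.2.2 := fun y hy => hd y (by simp [hy])
    by_cases h1 : s < x
    · have h2 : s < y := lt_trans h1 hxy
      simpa [absorb, h1, h2] using ih htl (x + dd) (y + dd) (by omega)
    · by_cases h2 : s < y
      · have := absorb_ge tl htl (y + dd)
        simp only [absorb, if_pos h2, if_neg h1]
        omega
      · simpa [absorb, h1, h2] using hxy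

theorem absorb_cons_lt (b : String × Int × Int) (l : List (String × Int × Int)) (x : Int)
    (h : b.2.1 < x) : absorb x (b :: l) = absorb (x + b.2.2) l := by
  obtain ⟨nm, s, dd⟩ := b; simp_all [absorb]

theorem absorb_cons_ge (b : String × Int × Int) (l : List (String × Int × Int)) (x : Int)
    (h : x ≤ b.2.1) : absorb x (b :: l) = x := by
  obtain ⟨nm, s, dd⟩ := b; simp_all [absorb]

theorem stKeys_snd (x : Int) (st : List (String × Int)) (rest : List (String × Int × Int)) :
    (stKeys x st rest).map Prod.snd = st.map Prod.fst := by
  induction st generalizing x with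
  | nil => rfl
  | cons e tl ih => obtain ⟨nm, r⟩ := e; simp [stKeys, ih]

theorem stKeys_absorb (x : Int) (st : List (String × Int)) (rest : List (String × Int × Int))
    (hst : ∀ e ∈ st, 0 < e.2) :
    ∀ p ∈ stKeys x st rest, ∃ y, x < y ∧ p.1 = absorb y rest := by
  induction st generalizing x with
  | nil => simp [stKeys]
  | cons e tl ih =>
    obtain ⟨nm, r⟩ := e
    have hr : (0 : Int) < r := hst (nm, r) (by simp)
    have htl : ∀ e ∈ tl, 0 < e.2 := fun e he => hst e (by simp [he])
    intro p hp
    rcases (by simpa [stKeys] using hp : p = (absorb (x + r) rest, nm) ∨ p ∈ stKeys (x + r) tl rest) with rfl | hp'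
    · exact ⟨x + r, by omega, rfl⟩
    · obtain ⟨y, hy1, hy2⟩ := ih (x + r) htl p hp'
      exact ⟨y, by omega, hy2⟩

theorem stKeys_lb (x : Int) (st : List (String × Int)) (rest : List (String × Int × Int))
    (hst : ∀ e ∈ st, 0 < e.2) (hd : ∀ y ∈ rest, 0 ≤ y.2.2) :
    ∀ p ∈ stKeys x st rest, x < p.1 := by
  intro p hp
  obtain ⟨y, hy1, hy2⟩ := stKeys_absorb x st rest hst p hp
  have := absorb_ge rest hd y
  omega

theorem stKeys_pairwise (x : Int) (st : List (String × Int)) (rest : List (String × Int × Int))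
    (hst : ∀ e ∈ st, 0 < e.2) (hd : ∀ y ∈ rest, 0 ≤ y.2.2) :
    (stKeys x st rest).Pairwise (fun u v => u.1 < v.1) := by
  induction st generalizing x with
  | nil => simp [stKeys]
  | cons e tl ih =>
    obtain ⟨nm, r⟩ := e
    have hr : (0 : Int) < r := hst (nm, r) (by simp)
    have htl : ∀ e ∈ tl, 0 < e.2 := fun e he => hst e (by simp [he])
    refine List.Pairwise.cons ?_ (ih (x + r) htl)
    intro v hv
    obtain ⟨y, hy1, hy2⟩ := stKeys_absorb (x + r) tl rest htl v hv
    have h2 := absorb_mono rest hd (x + r) y hy1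
    simp only [hy2]
    exact h2

theorem stKeys_cons_absorb (x : Int) (st : List (String × Int)) (b : String × Int × Int)
    (rest : List (String × Int × Int)) (hb : b.2.1 < x) (hst : ∀ e ∈ st, 0 < e.2) :
    stKeys x st (b :: rest) = stKeys (x + b.2.2) st rest := by
  induction st generalizing x with
  | nil => rfl
  | cons e tl ih =>
    obtain ⟨nm, r⟩ := e
    have hr : (0 : Int) < r := hst (nm, r) (by simp)
    have htl : ∀ e ∈ tl, 0 < e.2 := fun e he => hst e (by simp [he])
    have hb' : b.2.1 < x + r := by omega
    have e1 : x + r + b.2.2 = x + b.2.2 + r := by ring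
    simp only [stKeys, absorb_cons_lt b rest (x + r) hb', e1, ih (x + r) hb' htl]

theorem finishList_lb (l : List (String × Int × Int)) (c : Int)
    (hd : ∀ y ∈ l, 1 ≤ y.2.2) (ht : ∀ y ∈ l, c ≤ y.2.1) :
    ∀ p ∈ finishList l, c < p.1 := by
  induction l with
  | nil => simp [finishList]
  | cons b tl ih =>
    obtain ⟨nm, s, dd⟩ := b
    have h1 : (1 : Int) ≤ dd := hd (nm, s, dd) (by simp)
    have h2 : c ≤ s := ht (nm, s, dd) (by simp)
    have htl1 : ∀ y ∈ tl, 1 ≤ y.2.2 := fun y hy => hd y (by simp [hy])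
    have htl2 : ∀ y ∈ tl, c ≤ y.2.1 := fun y hy => ht y (by simp [hy])
    intro p hp
    rcases (by simpa [finishList] using hp : p = (absorb (s + dd) tl, nm) ∨ p ∈ finishList tl) with rfl | hp'
    · have := absorb_ge tl (fun y hy => le_trans (by omega) (htl1 y hy)) (s + dd)
      dsimp only
      omega
    · exact ih htl1 htl2 p hp' 

theorem allPairs_lb (cur : String × Int × Int) (st : List (String × Int))
    (rest : List (String × Int × Int)) (hcur : 1 ≤ cur.2.2) (hst : ∀ e ∈ st, 0 < e.2)
    (hd : ∀ y ∈ rest, 1 ≤ y.2.2) (ht : ∀ y ∈ rest, cur.2.1 ≤ y.2.1) :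
    ∀ p ∈ allPairs cur st rest, cur.2.1 < p.1 := by
  have hd0 : ∀ y ∈ rest, (0 : Int) ≤ y.2.2 := fun y hy => le_trans (by omega) (hd y hy)
  intro p hp
  rcases (by simpa [allPairs] using hp :
      p = (absorb (cur.2.1 + cur.2.2) rest, cur.1) ∨
        p ∈ stKeys (cur.2.1 + cur.2.2) st rest ∨ p ∈ finishList rest) with rfl | hp' | hp'
  · have := absorb_ge rest hd0 (cur.2.1 + cur.2.2); simp; omega
  · have := stKeys_lb (cur.2.1 + cur.2.2) st rest hst hd0 p hp'; omega
  · exact finishList_lb rest cur.2.1 hd ht p hp' 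

theorem drainA_acc (rt : Int) (st : List (String × Int)) (x y : List String) :
    drainA rt st (x ++ y) = (x ++ (drainA rt st y).1, (drainA rt st y).2) := by
  induction st generalizing rt y with
  | nil => simp [drainA]
  | cons e tl ih =>
    obtain ⟨nm, r⟩ := e
    by_cases h : r - |rt| ≤ 0
    · simpa [drainA, h, List.append_assoc] using ih (r - |rt|) (y ++ [nm])
    · simp [drainA, h]

theorem drain_glue (st : List (String × Int)) (x rt : Int) (b : String × Int × Int)
    (rest : List (String × Int × Int)) (hrt : rt ≤ 0) (hst : ∀ e ∈ st, 0 < e.2)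
    (hx : x + (-rt) = b.2.1) :
    ∃ K st', drainA rt st [] = (K.map Prod.snd, st') ∧ (∀ e ∈ st', 0 < e.2) ∧
      stKeys x st (b :: rest) = K ++ stKeys (b.2.1 + b.2.2) st' rest ∧
      K.Pairwise (fun u v => u.1 < v.1) ∧ (∀ p ∈ K, x < p.1 ∧ p.1 ≤ b.2.1) := by
  induction st generalizing x rt with
  | nil =>
    exact ⟨[], [], rfl, by simp, rfl, by simp, by simp⟩
  | cons e tl ih =>
    obtain ⟨nm, r⟩ := e
    have hr : (0 : Int) < r := hst (nm, r) (by simp)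
    have htl : ∀ e ∈ tl, 0 < e.2 := fun e he => hst e (by simp [he])
    have habs : |rt| = -rt := abs_of_nonpos hrt
    by_cases hpop : r - |rt| ≤ 0
    · -- the top of the stack is finished and popped
      have hr' : r + rt ≤ 0 := by omega
      obtain ⟨K, st', h1, h2, h3, h4, h5⟩ :=
        ih (x + r) (r - |rt|) (by omega) htl (by omega)
      refine ⟨(x + r, nm) :: K, st', ?_, h2, ?_, ?_, ?_⟩
      · have : drainA rt ((nm, r) :: tl) [] = drainA (r - |rt|) tl [nm] := by
          simp [drainA, hpop]
        rw [this, show ([nm] : List String) = [nm] ++ [] by simp, drainA_acc, h1]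
        simp
      · have hxr : x + r ≤ b.2.1 := by omega
        simp only [stKeys, absorb_cons_ge b rest (x + r) hxr, h3, List.cons_append]
      · exact List.Pairwise.cons (fun v hv => (h5 v hv).1) h4
      · intro p hp
        rcases List.mem_cons.mp hp with rfl | hp'
        · exact ⟨by simp; omega, by simp; omega⟩
        · have := h5 p hp'; exact ⟨by omega, this.2⟩
    · -- the top survives with reduced remainder; everything below is untouched
      have hbx : b.2.1 < x + r := by omega
      refine ⟨[], (nm, r - |rt|) :: tl, by simp [drainA, hpop], ?_, ?_, by simp, by simp⟩
      · intro e he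
        rcases List.mem_cons.mp he with rfl | he'
        · simp; omega
        · exact hst e (by simp [he'])
      · have e1 : x + r + b.2.2 = b.2.1 + b.2.2 + (r - |rt|) := by omega
        simp only [stKeys, absorb_cons_lt b rest (x + r) hbx, e1,
          stKeys_cons_absorb (x + r) tl b rest hbx htl]
        rfl

-- ---- the main invariant: the machine emits names in strictly increasing finish-time order ----

theorem runR_sorted (rest : List (String × Int × Int)) (cur : String × Int × Int)
    (st : List (String × Int)) (hrt : ∀ y ∈ rest, cur.2.1 ≤ y.2.1)
    (hrp : rest.Pairwise (fun a b => a.2.1 ≤ b.2.1)) (hrd : ∀ y ∈ rest, 1 ≤ y.2.2)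
    (hcur : 1 ≤ cur.2.2) (hst : ∀ e ∈ st, 0 < e.2) :
    ∃ L : List (Int × String), runR cur st rest = L.map Prod.snd ∧ L.Perm (allPairs cur st rest) ∧
      L.Pairwise (fun u v => u.1 < v.1) := by
  induction rest generalizing cur st with
  | nil =>
    refine ⟨allPairs cur st [], ?_, List.Perm.refl _, ?_⟩
    · simp [runR, allPairs, absorb, stKeys_snd, finishList]
    · refine List.Pairwise.cons ?_ ?_
      · intro v hv
        simp only [finishList, List.append_nil] at hv
        simpa [absorb] using stKeys_lb _ st [] hst (by simp) v hv
      · simpa [finishList] using stKeys_pairwise _ st [] hst (by simp)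
  | cons b rest' ih =>
    have hcb : cur.2.1 ≤ b.2.1 := hrt b (by simp)
    have hbd : 1 ≤ b.2.2 := hrd b (by simp)
    have hrt' : ∀ y ∈ rest', b.2.1 ≤ y.2.1 := (List.pairwise_cons.mp hrp).1
    have hrp' : rest'.Pairwise (fun a b => a.2.1 ≤ b.2.1) := (List.pairwise_cons.mp hrp).2
    have hrd' : ∀ y ∈ rest', 1 ≤ y.2.2 := fun y hy => hrd y (by simp [hy])
    have hrd0' : ∀ y ∈ rest', (0 : Int) ≤ y.2.2 := fun y hy => le_trans (by omega) (hrd' y hy)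
    set x := cur.2.1 + cur.2.2 with hxdef
    set rt := cur.2.2 - (b.2.1 - cur.2.1) with hrtdef
    by_cases hpos : rt > 0
    · -- the current task is interrupted and pushed
      have hbx : b.2.1 < x := by omega
      obtain ⟨L, hL1, hL2, hL3⟩ := ih b ((cur.1, rt) :: st) hrt' hrp' hrd' hbd
        (by intro e he; rcases List.mem_cons.mp he with rfl | he'
            · simpa using hpos
            · exact hst e he')
      refine ⟨L, ?_, ?_, hL3⟩
      · rw [show runR cur st (b :: rest') = runR b ((cur.1, rt) :: st) rest' by
          simp [runR, ← hrtdef, hpos]]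
        exact hL1
      · refine hL2.trans ?_
        have e1 : b.2.1 + b.2.2 + rt = x + b.2.2 := by omega
        have hAnew : allPairs b ((cur.1, rt) :: st) rest' =
            (absorb (b.2.1 + b.2.2) rest', b.1) ::
              ((absorb (x + b.2.2) rest', cur.1) :: stKeys (x + b.2.2) st rest')
                ++ finishList rest' := by
          simp [allPairs, stKeys, e1, List.cons_append]
        have hAold : allPairs cur st (b :: rest') =
            (absorb (x + b.2.2) rest', cur.1) ::
              (stKeys (x + b.2.2) st rest'
                ++ ((absorb (b.2.1 + b.2.2) rest', b.1) :: finishList rest')) := by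
          simp only [allPairs, ← hxdef, absorb_cons_lt b rest' x hbx,
            stKeys_cons_absorb x st b rest' hbx hst, finishList]
        rw [hAnew, hAold]
        refine List.Perm.trans (List.Perm.swap _ _ _) ?_
        exact List.Perm.cons _ List.perm_middle.symm
    · -- the current task finishes; pops happen with the leftover slack
      have hxb : x ≤ b.2.1 := by omega
      obtain ⟨K, st', hg1, hg2, hg3, hg4, hg5⟩ :=
        drain_glue st x rt b rest' (by omega) hst (by omega)
      obtain ⟨L', hL1, hL2, hL3⟩ := ih b st' hrt' hrp' hrd' hbd hg2
      have hdr : drainA rt st [cur.1] = (cur.1 :: K.map Prod.snd, st') := by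
        rw [show ([cur.1] : List String) = [cur.1] ++ [] by simp, drainA_acc, hg1]
        simp
      have hLb : ∀ p ∈ L', b.2.1 < p.1 := by
        intro p hp
        exact allPairs_lb b st' rest' hbd hg2 hrd' hrt' p (hL2.mem_iff.mp hp)
      refine ⟨(x, cur.1) :: K ++ L', ?_, ?_, ?_⟩
      · rw [show runR cur st (b :: rest') = (drainA rt st [cur.1]).1
              ++ runR b (drainA rt st [cur.1]).2 rest' by simp [runR, ← hrtdef, hpos]]
        rw [hdr]
        simp [hL1]
      · have hAold : allPairs cur st (b :: rest') =
            (x, cur.1) :: ((K ++ stKeys (b.2.1 + b.2.2) st' rest')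
              ++ ((absorb (b.2.1 + b.2.2) rest', b.1) :: finishList rest')) := by
          simp only [allPairs, ← hxdef, absorb_cons_ge b rest' x hxb, hg3, finishList]
        rw [hAold]
        refine List.Perm.cons _ ?_
        refine List.Perm.trans (List.Perm.append_left K (hL2.trans (List.Perm.refl _))) ?_
        rw [List.append_assoc]
        exact List.Perm.append_left K (by simpa [allPairs] using
          (List.perm_middle (a := (absorb (b.2.1 + b.2.2) rest', b.1))
            (l₁ := stKeys (b.2.1 + b.2.2) st' rest') (l₂ := finishList rest')).symm)
      · refine List.Pairwise.cons ?_ (List.pairwise_append.mpr ⟨hg4, hL3, ?_⟩)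
        · intro v hv
          rcases List.mem_append.mp hv with hv' | hv'
          · exact (hg5 v hv').1
          · have := hLb v hv'; omega
        · intro u hu v hv
          have h1 := (hg5 u hu).2
          have h2 := hLb v hv
          omega

-- ---- A's index loop is the machine ----

theorem rangefold {α σ : Type} (d : α) (F : σ → α → α → σ) :
    ∀ (ps : List α) (init : σ),
      (List.range (ps.length - 1)).foldl (fun s k => F s (ps.getD k d) (ps.getD (k + 1) d)) init
        = (ps.zip ps.tail).foldl (fun s p => F s p.1 p.2) init := by
  intro ps
  induction ps with
  | nil => intro init; rfl
  | cons a tl ih =>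
    intro init
    match tl, ih with
    | [], _ => rfl
    | b :: t, ih =>
      have hrange : List.range ((a :: b :: t).length - 1) =
          0 :: (List.range ((b :: t).length - 1)).map (· + 1) := by
        simp [List.range_succ_eq_map]
      rw [hrange]
      simp only [List.foldl_cons, List.foldl_map]
      simpa using ih (F init a b)

theorem pyRange_zipfold {α σ : Type} (d : α) (F : σ → α → α → σ) (ps : List α) (init : σ) :
    (PySem.List.pyRange 1 (PySem.List.len ps) 1).foldl
        (fun s i => F s (PySem.List.pyGetD ps (i - 1) d) (PySem.List.pyGetD ps i d)) init
      = (ps.zip ps.tail).foldl (fun s p => F s p.1 p.2) init := by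
  rw [← rangefold d F ps init]
  rw [PySem.List.len_eq, PySem.List.pyRange_one]
  rw [List.foldl_map]
  have hlen : ((ps.length : Int) - 1).toNat = ps.length - 1 := by omega
  rw [hlen]
  apply PySem.List.foldl_congr_mem
  intro acc k hk
  have h1 : (1 : Int) + (k : Int) - 1 = ((k : Nat) : Int) := by ring
  have h2 : (1 : Int) + (k : Int) = (((k + 1 : Nat)) : Int) := by push_cast; ring
  rw [h1, h2, PySem.List.pyGetD_natCast, PySem.List.pyGetD_natCast]

theorem runR_fold : ∀ (rest : List (String × Int × Int)) (cur : String × Int × Int)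
    (ans : List String) (st : List (String × Int)),
    (let r := ((cur :: rest).zip rest).foldl stepPz (ans, st);
     (r.1 ++ [((cur :: rest).getLast (by simp)).1]) ++ r.2.map Prod.fst)
      = ans ++ runR cur st rest := by
  intro rest
  induction rest with
  | nil => intro cur ans st; simp [runR]
  | cons b rest' ih =>
    intro cur ans st
    have hzip : ((cur :: b :: rest').zip (b :: rest')) = (cur, b) :: ((b :: rest').zip rest') := by
      simp [List.zip_cons_cons]
    have hlast : (cur :: b :: rest').getLast (by simp) = (b :: rest').getLast (by simp) := by
      simp [List.getLast_cons]
    simp only [hzip, List.foldl_cons, hlast]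
    by_cases hrt : cur.2.2 - (b.2.1 - cur.2.1) > 0
    · have hstep : stepPz (ans, st) (cur, b) = (ans, (cur.1, cur.2.2 - (b.2.1 - cur.2.1)) :: st) := by
        simp only [stepPz, stepP]
        rw [if_pos hrt]
      rw [hstep, ih]
      have hrun : runR cur st (b :: rest') = runR b ((cur.1, cur.2.2 - (b.2.1 - cur.2.1)) :: st) rest' := by
        simp only [runR]
        rw [if_pos hrt]
      rw [hrun]
    · have hstep : stepPz (ans, st) (cur, b) =
          drainA (cur.2.2 - (b.2.1 - cur.2.1)) st (ans ++ [cur.1]) := by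
        simp only [stepPz, stepP]
        rw [if_neg hrt]
      rw [hstep, drainA_acc, ih]
      have hrun : runR cur st (b :: rest') =
          (drainA (cur.2.2 - (b.2.1 - cur.2.1)) st [cur.1]).1 ++
            runR b (drainA (cur.2.2 - (b.2.1 - cur.2.1)) st [cur.1]).2 rest' := by
        simp only [runR]
        rw [if_neg hrt]
      rw [hrun, List.append_assoc]

-- ---- glue ----

-- the body of A's loop as a function of the two adjacent (sorted) plans
def stepStr (s : List String × List (String × Int)) (prev cur : List String) :
    List String × List (String × Int) :=
  let ph := (pyParseTwo (PySem.List.pyGetD prev 1 "")).1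
  let pm := (pyParseTwo (PySem.List.pyGetD prev 1 "")).2
  let lh := (pyParseTwo (PySem.List.pyGetD cur 1 "")).1
  let lm := (pyParseTwo (PySem.List.pyGetD cur 1 "")).2
  let dh := lh - ph
  let dm0 := lm - pm
  let dm := if dh > 0 then dm0 + dh * 60 else dm0
  let restTime := (PySem.Int.ofStr? (PySem.List.pyGetD prev 2 "")).getD 0 - dm
  if restTime > 0 then (s.1, (PySem.List.pyGetD prev 0 "", restTime) :: s.2)
  else drainA restTime s.2 (s.1 ++ [PySem.List.pyGetD prev 0 ""])

theorem pairwise_zip_tail {α : Type} {R : α → α → Prop} :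
    ∀ (l : List α), l.Pairwise R → ∀ pr ∈ l.zip l.tail, R pr.1 pr.2 := by
  intro l
  induction l with
  | nil => simp
  | cons a tl ih =>
    intro hp pr hpr
    match tl, hpr with
    | b :: t, hpr =>
      rcases List.mem_cons.mp (by simpa [List.zip_cons_cons] using hpr) with rfl | hpr'
      · exact (List.pairwise_cons.mp hp).1 b (by simp)
      · exact ih (List.pairwise_cons.mp hp).2 pr hpr'

theorem plan_key (p : List String) (nm time dur : String) (tl : List String)
    (hp : p = nm :: time :: dur :: tl) : PySem.List.pyGetD p (1 : Int) "" = time := by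
  subst hp; simp [pysem]

theorem step_bridge (s : List String × List (String × Int)) (p q : List String)
    (hp : planOK p = true) (hq : planOK q = true)
    (hle : PySem.List.pyGetD p (1 : Int) "" ≤ PySem.List.pyGetD q (1 : Int) "") :
    stepStr s p q = stepP s (parseTaskB p) (parseTaskB q) := by
  obtain ⟨nmp, tp, dp, tlp, hps, htp, hdp⟩ := planOK_shape p hp
  obtain ⟨nmq, tq, dq, tlq, hqs, htq, hdq⟩ := planOK_shape q hq
  obtain ⟨hp2, hpB, hph1, hph2, hpm1, hpm2⟩ := timeOK_facts tp htp
  obtain ⟨hq2, hqB, hqh1, hqh2, hqm1, hqm2⟩ := timeOK_facts tq htq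
  have hkp := plan_key p nmp tp dp tlp hps
  have hkq := plan_key q nmq tq dq tlq hqs
  have hhv : hvOf tp ≤ hvOf tq ∧ hvOf tp * 60 + mvOf tp ≤ hvOf tq * 60 + mvOf tq :=
    timeOK_le tp tq htp htq (by rw [hkp, hkq] at hle; exact hle)
  have hBp := hpB p nmp dp tlp hps
  have hBq := hqB q nmq dq tlq hqs
  have hidx0 : PySem.List.pyGetD p (0 : Int) "" = nmp := by subst hps; simp [pysem]
  have hidx2 : PySem.List.pyGetD p (2 : Int) "" = dp := by subst hps; simp [pysem]
  have hdm : (if (pyParseTwo (PySem.List.pyGetD q (1 : Int) "")).1 -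
        (pyParseTwo (PySem.List.pyGetD p (1 : Int) "")).1 > 0 then
        ((pyParseTwo (PySem.List.pyGetD q (1 : Int) "")).2 -
          (pyParseTwo (PySem.List.pyGetD p (1 : Int) "")).2) +
          ((pyParseTwo (PySem.List.pyGetD q (1 : Int) "")).1 -
            (pyParseTwo (PySem.List.pyGetD p (1 : Int) "")).1) * 60
      else (pyParseTwo (PySem.List.pyGetD q (1 : Int) "")).2 -
          (pyParseTwo (PySem.List.pyGetD p (1 : Int) "")).2)
      = (parseTaskB q).2.1 - (parseTaskB p).2.1 := by
    rw [hkp, hkq, hp2, hq2, hBp, hBq]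
    simp only
    split_ifs with hgt
    · omega
    · have := hhv.1
      omega
  unfold stepStr stepP
  simp only [hdm, hidx0, hidx2, hBp, hBq]


theorem solution_eq (plans : List (List String)) (hpre : Pre_solution plans) :
    Spec_solution plans (solution plans) := by
  unfold Spec_solution
  have hne0 : plans ≠ [] := by
    rcases hpre with ⟨h1, _⟩ | ⟨h1, _⟩
    · intro h; subst h; simp at h1
    · exact h1
  set ps := PySem.List.sorted plans (fun x => PySem.List.pyGetD x 1 "") false with hpsdef
  have hne : ps ≠ [] := by
    rw [hpsdef, Ne, PySem.List.sorted_eq_nil_iff _ _ _]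
    exact hne0
  have hpair : ps.Pairwise (fun a b => PySem.List.pyGetD a (1 : Int) "" ≤ PySem.List.pyGetD b (1 : Int) "") :=
    PySem.List.sorted_pairwise plans _
  -- A's index loop over ps, as a fold over adjacent pairs
  have hsolA : solution plans =
      (let r := (ps.zip ps.tail).foldl (fun s pr => stepStr s pr.1 pr.2) ([], []);
       (r.1 ++ [PySem.List.pyGetD (PySem.List.pyGetD ps (-1) []) 0 ""]) ++ r.2.map Prod.fst) := by
    rw [show solution plans =
        (let r := (PySem.List.pyRange 1 (PySem.List.len ps) 1).foldl
            (fun s i => stepStr s (PySem.List.pyGetD ps (i - 1) []) (PySem.List.pyGetD ps i [])) ([], []);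
         (r.1 ++ [PySem.List.pyGetD (PySem.List.pyGetD ps (-1) []) 0 ""]) ++ r.2.map Prod.fst) from rfl]
    rw [pyRange_zipfold ([] : List String) stepStr ps ([], [])]
  obtain ⟨p0, ps', hps⟩ := List.exists_cons_of_ne_nil hne
  by_cases hone : ps' = []
  · -- a single plan: A emits just its name; so does B's trivial branch
    subst hone
    have hA1 : solution plans = [PySem.List.pyGetD p0 0 ""] := by
      rw [hsolA, hps]
      simp [PySem.List.pyGetD_neg_one [p0] [] (by simp)]
    have hB1 : solution_alt plans = [PySem.List.pyGetD (PySem.List.pyGetD ps 0 []) 0 ""] := by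
      rw [show solution_alt plans =
          (if PySem.List.len ps = 1 then [PySem.List.pyGetD (PySem.List.pyGetD ps 0 []) 0 ""]
           else (PySem.List.sorted (finishList (ps.map parseTaskB)) (fun x => x.1) false).map Prod.snd)
          from rfl]
      rw [if_pos (by rw [hps]; simp)]
    rw [hA1, hB1, hps, PySem.List.pyGetD_zero_cons]
  · -- at least two plans: the canonical-format branch of Pre_
    have hall : ∀ p ∈ plans, planOK p = true := by
      rcases hpre with ⟨h1, _⟩ | ⟨_, hall⟩
      · exfalso
        have : ps.length = plans.length := (PySem.List.sorted_perm plans _ false).length_eq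
        rw [hps] at this
        simp [h1] at this
        exact hone this
      · exact hall
    have hmem : ∀ p ∈ ps, planOK p = true := by
      intro p hp
      exact hall p ((PySem.List.mem_sorted _ _ _ _).mp hp)
    have hlen_ne : ¬ PySem.List.len ps = 1 := by
      rw [hps]
      simp only [PySem.List.len_eq, List.length_cons]
      have : ps' ≠ [] := hone
      have : 1 ≤ ps'.length := List.length_pos_iff.mpr this
      omega
  -- replace the string-level step by the parsed-task step
    have hcong : (ps.zip ps.tail).foldl (fun s pr => stepStr s pr.1 pr.2) ([], []) =
        ((ps.map parseTaskB).zip (ps.map parseTaskB).tail).foldl stepPz ([], []) := by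
      rw [PySem.List.foldl_congr_mem _ _ (fun s pr => stepP s (parseTaskB pr.1) (parseTaskB pr.2)) _ ?side]
      · rw [show (ps.map parseTaskB).tail = ps.tail.map parseTaskB by
          cases ps <;> simp]
        rw [List.zip_map, List.foldl_map]
        simp [stepPz]
      case side =>
        intro acc pr hpr
        have h1 : pr.1 ∈ ps := (List.of_mem_zip hpr).1
        have h2 : pr.2 ∈ ps := List.mem_of_mem_tail (List.of_mem_zip hpr).2
        exact step_bridge acc pr.1 pr.2 (hmem _ h1) (hmem _ h2)
          (pairwise_zip_tail ps hpair pr hpr)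

    obtain ⟨p0, ps', hps⟩ := List.exists_cons_of_ne_nil hne
    set ts := ps.map parseTaskB with htsdef
    have hts : ts = parseTaskB p0 :: ps'.map parseTaskB := by rw [htsdef, hps]; rfl
    -- A's port is the machine runR
    have hlastA : PySem.List.pyGetD (PySem.List.pyGetD ps (-1) []) 0 "" = ((ts).getLast (by simp [hts])).1 := by
      rw [PySem.List.pyGetD_neg_one ps [] hne, ← parseTaskB_name]
      congr 1
      exact (List.getLast_map _).symm
    have hA : solution plans = runR (parseTaskB p0) [] (ps'.map parseTaskB) := by
      rw [hsolA]
      simp only [hcong, hlastA]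
      rw [show (ts.zip ts.tail) = (ts.zip (ps'.map parseTaskB)) by rw [hts]; rfl]
      have := runR_fold (ps'.map parseTaskB) (parseTaskB p0) [] []
      simp only [← hts] at this ⊢
      simpa using this
    -- facts about the parsed tasks
    have htle : ts.Pairwise (fun a b => a.2.1 ≤ b.2.1) := by
      rw [htsdef]
      rw [List.pairwise_map]
      refine List.Pairwise.imp_of_mem ?_ hpair
      intro a b ha hb hle
      obtain ⟨nma, ta, da, tla, has, hta, _⟩ := planOK_shape a (hmem a ha)
      obtain ⟨nmb, tb, db, tlb, hbs, htb, _⟩ := planOK_shape b (hmem b hb)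
      obtain ⟨_, hBa, _⟩ := timeOK_facts ta hta
      obtain ⟨_, hBb, _⟩ := timeOK_facts tb htb
      rw [hBa a nma da tla has, hBb b nmb db tlb hbs]
      have := (timeOK_le ta tb hta htb (by rwa [plan_key a nma ta da tla has, plan_key b nmb tb db tlb hbs] at hle)).2
      simpa using this
    have htd : ∀ y ∈ ts, 1 ≤ y.2.2 := by
      intro y hy
      rw [htsdef] at hy
      obtain ⟨p, hp, rfl⟩ := List.mem_map.mp hy
      obtain ⟨nm, t, dd, tl, hpsh, ht, hd⟩ := planOK_shape p (hmem p hp)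
      obtain ⟨_, hB, _⟩ := timeOK_facts t ht
      rw [hB p nm dd tl hpsh]
      simpa using hd
    have hp0 : parseTaskB p0 ∈ ts := by rw [hts]; simp
    have hmempair := List.pairwise_cons.mp (by rw [← hts]; exact htle)
    -- run the machine: names in strictly increasing finish-time order
    obtain ⟨L, hrun, hperm, hpw⟩ := runR_sorted (ps'.map parseTaskB) (parseTaskB p0) []
      hmempair.1 hmempair.2 (fun y hy => htd y (by rw [hts]; simp [hy]))
      (htd _ hp0) (by simp)
    -- those pairs are exactly B's finish list
    have hfl : allPairs (parseTaskB p0) [] (ps'.map parseTaskB) = finishList ts := by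
      rw [hts]
      obtain ⟨nm, t, dd⟩ := parseTaskB p0
      simp [allPairs, finishList, stKeys]
    have hB : solution_alt plans =
        (PySem.List.sorted (finishList ts) (fun x => x.1) false).map Prod.snd := by
      rw [show solution_alt plans =
          (if PySem.List.len ps = 1 then [PySem.List.pyGetD (PySem.List.pyGetD ps 0 []) 0 ""]
           else (PySem.List.sorted (finishList (ps.map parseTaskB)) (fun x => x.1) false).map Prod.snd)
          from rfl]
      rw [if_neg hlen_ne]
    have hsorted : PySem.List.sorted (finishList ts) (fun x => x.1) false = L := by
      apply PySem.List.sorted_eq_of_perm_of_pairwise_lt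
      · rw [← hfl]; exact hperm
      · exact hpw
    rw [hA, hB, hsorted, hrun]

-- ===== VERDICT (by name: the statement is the Claim_ definition above) =====
theorem solution_spec : Claim_equal_solution := by
  intro plans _ hpre
  exact solution_eq plans hpre
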